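-- pv_equiv track=rewrite | github.com/vadimx30/SpecialistPython1 | Module4/practice/m4_t2.py | tuple_comparison_2
-- ===== SOURCE A (Python) =====
-- def tuple_comparison_2 (tuple_a: tuple, tuple_b: tuple) -> tuple:
--     '''сопоставление элементов кортежа a
--     с каждым элементом кортежа b (a(i) vs b(i)...b(n)'''
--     count_more = 0
--     count_equal = 0
--     count_less = 0
--     for i in range(len(tuple_a)):
--         x = 0
--         while x < len(tuple_b):
--             if tuple_a[i] > tuple_b[x]:
--                 count_more += 1
--             elif tuple_a[i] == tuple_b[x]:
--                 count_equal += 1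
--             else:
--                 count_less += 1
--             x +=1
--     return count_more, count_equal, count_less
-- ===== SOURCE B (Python) =====
-- def _bisect_left(arr, v):
--     lo, hi = 0, len(arr)
--     while lo < hi:
--         mid = (lo + hi) // 2
--         if arr[mid] < v:
--             lo = mid + 1
--         else:
--             hi = mid
--     return lo
--
--
-- def _bisect_right(arr, v):
--     lo, hi = 0, len(arr)
--     while lo < hi:
--         mid = (lo + hi) // 2
--         if v < arr[mid]:
--             hi = mid
--         else:
--             lo = mid + 1
--     return lo
--
--
-- def tuple_comparison_2(tuple_a: tuple, tuple_b: tuple) -> tuple: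
--     bs = sorted(tuple_b)
--     m = len(bs)
--     count_more = 0
--     count_equal = 0
--     count_less = 0
--     for v in tuple_a:
--         lo = _bisect_left(bs, v)
--         hi = _bisect_right(bs, v)
--         count_more += lo
--         count_equal += hi - lo
--         count_less += m - hi
--     return count_more, count_equal, count_less
-- ===== Notes on version B (the rewrite author's own statement) =====
-- stated objective: faster
-- what changed: B sorts tuple_b once and, for each element of tuple_a, hand-written binary searches (bisect_left/bisect_right) give the less/equal/greater tallies, replacing A's inner scan of all of tuple_b per element.
import Mathlib
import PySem

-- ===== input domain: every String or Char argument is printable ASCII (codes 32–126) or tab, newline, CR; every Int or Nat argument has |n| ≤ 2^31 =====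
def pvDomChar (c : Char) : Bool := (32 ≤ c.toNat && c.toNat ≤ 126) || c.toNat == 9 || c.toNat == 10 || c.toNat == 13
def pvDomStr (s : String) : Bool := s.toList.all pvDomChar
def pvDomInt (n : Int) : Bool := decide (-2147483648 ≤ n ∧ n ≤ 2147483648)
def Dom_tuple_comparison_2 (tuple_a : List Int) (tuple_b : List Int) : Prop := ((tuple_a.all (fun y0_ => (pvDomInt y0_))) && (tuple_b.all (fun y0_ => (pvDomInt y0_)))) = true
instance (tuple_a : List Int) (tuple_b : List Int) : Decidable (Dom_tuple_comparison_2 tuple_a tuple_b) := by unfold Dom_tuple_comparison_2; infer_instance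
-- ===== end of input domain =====

-- B replaces A's quadratic nested scan by sorting tuple_b once and binary-searching it
-- per element of tuple_a (O((n+m) log m)); measured faster (asymptotic).

-- ===== PORT A =====
-- A: for each element of tuple_a, a while loop scans all of tuple_b, bumping one of three counters.
def tuple_comparison_2 (tuple_a : List Int) (tuple_b : List Int) : Int × Int × Int :=
  tuple_a.foldl (fun acc ai =>
    tuple_b.foldl (fun (c : Int × Int × Int) bx =>
      if ai > bx then (c.1 + 1, c.2.1, c.2.2)
      else if ai == bx then (c.1, c.2.1 + 1, c.2.2)
      else (c.1, c.2.1, c.2.2 + 1)) acc) (0, 0, 0)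

-- ===== PORT B =====
-- hand-written bisect_left of Source B (while lo < hi), transcribed with Nat indices (lo, hi stay
-- in [0, len]); the structural fuel (≥ hi - lo at every call) only makes the loop total in Lean
def pvBlAux (arr : List Int) (v : Int) (fuel : Nat) (lo hi : Nat) : Nat :=
  match fuel with
  | 0 => lo
  | fuel + 1 =>
    if lo < hi then
      let mid := (lo + hi) / 2
      if arr.getD mid 0 < v then pvBlAux arr v fuel (mid + 1) hi else pvBlAux arr v fuel lo mid
    else lo

-- hand-written bisect_right of Source B
def pvBrAux (arr : List Int) (v : Int) (fuel : Nat) (lo hi : Nat) : Nat :=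
  match fuel with
  | 0 => lo
  | fuel + 1 =>
    if lo < hi then
      let mid := (lo + hi) / 2
      if v < arr.getD mid 0 then pvBrAux arr v fuel lo mid else pvBrAux arr v fuel (mid + 1) hi
    else lo

def tuple_comparison_2_alt (tuple_a : List Int) (tuple_b : List Int) : Int × Int × Int :=
  let bs := PySem.List.sorted tuple_b (fun x => x) false
  let m := bs.length
  tuple_a.foldl (fun (c : Int × Int × Int) v =>
    let lo := pvBlAux bs v m 0 m
    let hi := pvBrAux bs v m 0 m
    (c.1 + (lo : Int), c.2.1 + ((hi : Int) - (lo : Int)), c.2.2 + ((m : Int) - (hi : Int)))) (0, 0, 0)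

-- ===== PRECONDITION & SPEC =====
def Spec_tuple_comparison_2 (tuple_a : List Int) (tuple_b : List Int) (out : Int × Int × Int) : Prop := out = tuple_comparison_2_alt tuple_a tuple_b
instance (tuple_a : List Int) (tuple_b : List Int) (out : Int × Int × Int) : Decidable (Spec_tuple_comparison_2 tuple_a tuple_b out) := by unfold Spec_tuple_comparison_2; infer_instance

-- ===== CLAIM (what is proved, stated in full; the proofs are below) =====
def Claim_equal_tuple_comparison_2 : Prop := ∀ (tuple_a : List Int) (tuple_b : List Int), Dom_tuple_comparison_2 tuple_a tuple_b → Spec_tuple_comparison_2 tuple_a tuple_b (tuple_comparison_2 tuple_a tuple_b)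

-- ===== LEMMAS AND PROOFS =====

-- a list whose first k elements satisfy p and the rest do not has countP p = k
lemma pv_countP_split (p : Int → Bool) :
    ∀ (arr : List Int) (k : Nat), k ≤ arr.length →
      (∀ i, i < arr.length → (p (arr.getD i 0) = true ↔ i < k)) →
      arr.countP p = k := by
  intro arr
  induction arr with
  | nil => intro k hk _; simp at hk ⊢; omega
  | cons a t ih =>
    intro k hk hiff
    cases k with
    | zero =>
      have ha : p a = false := by
        have := hiff 0 (by simp)
        simp at this; simpa using this
      have ht : t.countP p = 0 := by
        apply ih 0 (by omega)
        intro i hi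
        have := hiff (i + 1) (by simp; omega)
        simpa using this
      simp [List.countP_cons, ha, ht]
    | succ k' =>
      have ha : p a = true := by
        have := hiff 0 (by simp)
        simpa using this.mpr (by omega)
      have ht : t.countP p = k' := by
        apply ih k' (by simpa using hk)
        intro i hi
        have := hiff (i + 1) (by simp; omega)
        simp at this
        constructor
        · intro h; have := this.mp h; omega
        · intro h; exact this.mpr (by omega)
      simp [List.countP_cons, ha, ht]

-- sortedness gives monotone getD
lemma pv_getD_mono (arr : List Int) (hs : arr.Pairwise (· ≤ ·)) :
    ∀ i j, i ≤ j → j < arr.length → arr.getD i 0 ≤ arr.getD j 0 := by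
  intro i j hij hj
  rcases Nat.eq_or_lt_of_le hij with h | h
  · subst h; rfl
  · have hp := List.pairwise_iff_getElem.mp hs i j (by omega) hj h
    rw [List.getD_eq_getElem arr 0 (by omega), List.getD_eq_getElem arr 0 hj]
    exact hp

lemma pvBlAux_eq (arr : List Int) (v : Int) (hs : arr.Pairwise (· ≤ ·)) :
    ∀ fuel lo hi, hi - lo ≤ fuel → lo ≤ hi → hi ≤ arr.length →
      (∀ i, i < lo → arr.getD i 0 < v) →
      (∀ i, hi ≤ i → i < arr.length → v ≤ arr.getD i 0) →
      pvBlAux arr v fuel lo hi = arr.countP (fun x => x < v) := by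
  intro fuel
  induction fuel with
  | zero =>
    intro lo hi hf hle hhi hlow hhigh
    have hlo : lo = hi := by omega
    subst hlo
    simp only [pvBlAux]
    refine (pv_countP_split _ arr lo (by omega) ?_).symm
    intro i hi'
    simp only [decide_eq_true_eq]
    exact ⟨fun hp => by by_contra hge; exact absurd (hhigh i (by omega) hi') (by omega),
           fun hil => hlow i hil⟩
  | succ fuel ih =>
  intro lo hi hf hle hhi hlow hhigh
  rw [pvBlAux]
  by_cases h : lo < hi
  · simp only [h, if_pos]
    set mid := (lo + hi) / 2 with hmid
    have hm1 : lo ≤ mid := by omega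
    have hm2 : mid < hi := by omega
    by_cases hc : arr.getD mid 0 < v
    · simp only [hc, if_pos]
      exact ih (mid + 1) hi (by omega) (by omega) hhi
        (fun i hi' => lt_of_le_of_lt (pv_getD_mono arr hs i mid (by omega) (by omega)) hc)
        hhigh
    · simp only [hc, if_neg, not_false_iff]
      exact ih lo mid (by omega) (by omega) (by omega) hlow
        (fun i hi' hil => le_trans (not_lt.mp hc) (pv_getD_mono arr hs mid i hi' hil))
  · simp only [h, if_neg, not_false_iff]
    have hlo : lo = hi := by omega
    subst hlo
    refine (pv_countP_split _ arr lo (by omega) ?_).symm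
    intro i hi'
    simp only [decide_eq_true_eq]
    constructor
    · intro hp
      by_contra hge
      exact absurd (hhigh i (by omega) hi') (by omega)
    · intro hil; exact hlow i hil

lemma pvBrAux_eq (arr : List Int) (v : Int) (hs : arr.Pairwise (· ≤ ·)) :
    ∀ fuel lo hi, hi - lo ≤ fuel → lo ≤ hi → hi ≤ arr.length →
      (∀ i, i < lo → arr.getD i 0 ≤ v) →
      (∀ i, hi ≤ i → i < arr.length → v < arr.getD i 0) →
      pvBrAux arr v fuel lo hi = arr.countP (fun x => x ≤ v) := by
  intro fuel
  induction fuel with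
  | zero =>
    intro lo hi hf hle hhi hlow hhigh
    have hlo : lo = hi := by omega
    subst hlo
    simp only [pvBrAux]
    refine (pv_countP_split _ arr lo (by omega) ?_).symm
    intro i hi'
    simp only [decide_eq_true_eq]
    exact ⟨fun hp => by by_contra hge; exact absurd (hhigh i (by omega) hi') (by omega),
           fun hil => hlow i hil⟩
  | succ fuel ih =>
  intro lo hi hf hle hhi hlow hhigh
  rw [pvBrAux]
  by_cases h : lo < hi
  · simp only [h, if_pos]
    set mid := (lo + hi) / 2 with hmid
    have hm1 : lo ≤ mid := by omega
    have hm2 : mid < hi := by omega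
    by_cases hc : v < arr.getD mid 0
    · simp only [hc, if_pos]
      exact ih lo mid (by omega) (by omega) (by omega) hlow
        (fun i hi' hil => lt_of_lt_of_le hc (pv_getD_mono arr hs mid i hi' hil))
    · simp only [hc, if_neg, not_false_iff]
      exact ih (mid + 1) hi (by omega) (by omega) hhi
        (fun i hi' => le_trans (pv_getD_mono arr hs i mid (by omega) (by omega)) (not_lt.mp hc))
        hhigh
  · simp only [h, if_neg, not_false_iff]
    have hlo : lo = hi := by omega
    subst hlo
    refine (pv_countP_split _ arr lo (by omega) ?_).symm
    intro i hi'
    simp only [decide_eq_true_eq]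
    constructor
    · intro hp
      by_contra hge
      exact absurd (hhigh i (by omega) hi') (by omega)
    · intro hil; exact hlow i hil

-- counting identities
lemma pv_count_le_split (v : Int) : ∀ (l : List Int),
    l.countP (fun x => x ≤ v) = l.countP (fun x => x < v) + l.countP (fun x => v == x) := by
  intro l
  induction l with
  | nil => simp
  | cons a t ih =>
    simp only [List.countP_cons, ih, beq_iff_eq, decide_eq_true_eq]
    split_ifs <;> omega

lemma pv_count_len_split (v : Int) : ∀ (l : List Int),
    l.length = l.countP (fun x => x ≤ v) + l.countP (fun x => v < x) := by
  intro l
  induction l with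
  | nil => simp
  | cons a t ih =>
    simp only [List.length_cons, List.countP_cons, decide_eq_true_eq]
    split_ifs <;> omega

-- A's inner while loop over tuple_b adds the three counts to the accumulator
lemma pv_innerA (v : Int) : ∀ (b : List Int) (c : Int × Int × Int),
    b.foldl (fun (c : Int × Int × Int) bx =>
      if v > bx then (c.1 + 1, c.2.1, c.2.2)
      else if v == bx then (c.1, c.2.1 + 1, c.2.2)
      else (c.1, c.2.1, c.2.2 + 1)) c
    = (c.1 + (b.countP (fun x => x < v) : Int),
       c.2.1 + (b.countP (fun x => v == x) : Int),
       c.2.2 + (b.countP (fun x => v < x) : Int)) := by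
  intro b
  induction b with
  | nil => intro c; simp
  | cons bx t ih =>
    intro c
    rcases lt_trichotomy bx v with h | h | h
    · rw [List.foldl_cons, if_pos (show v > bx from h), ih]
      refine Prod.ext ?_ (Prod.ext ?_ ?_) <;>
        simp [List.countP_cons, h, (show ¬ v = bx by omega), (show ¬ v < bx by omega)] <;>
        push_cast <;> ring
    · subst h
      rw [List.foldl_cons, if_neg (lt_irrefl bx), if_pos (show (bx == bx) = true by simp), ih]
      refine Prod.ext ?_ (Prod.ext ?_ ?_) <;>
        simp [List.countP_cons] <;> push_cast <;> ring
    · rw [List.foldl_cons, if_neg (show ¬ v > bx by omega),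
        if_neg (show ¬ (v == bx) = true by simp; omega), ih]
      refine Prod.ext ?_ (Prod.ext ?_ ?_) <;>
        simp [List.countP_cons, h, (show ¬ bx < v by omega), (show ¬ v = bx by omega)] <;>
        push_cast <;> ring

-- B's per-element step over the sorted copy adds exactly the same three counts
lemma pv_stepB (v : Int) (b : List Int) :
    ((pvBlAux (PySem.List.sorted b (fun x => x) false) v (PySem.List.sorted b (fun x => x) false).length 0 (PySem.List.sorted b (fun x => x) false).length : Int)
        = (b.countP (fun x => x < v) : Int))
    ∧ ((pvBrAux (PySem.List.sorted b (fun x => x) false) v (PySem.List.sorted b (fun x => x) false).length 0 (PySem.List.sorted b (fun x => x) false).length : Int)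
        - (pvBlAux (PySem.List.sorted b (fun x => x) false) v (PySem.List.sorted b (fun x => x) false).length 0 (PySem.List.sorted b (fun x => x) false).length : Int)
        = (b.countP (fun x => v == x) : Int))
    ∧ (((PySem.List.sorted b (fun x => x) false).length : Int)
        - (pvBrAux (PySem.List.sorted b (fun x => x) false) v (PySem.List.sorted b (fun x => x) false).length 0 (PySem.List.sorted b (fun x => x) false).length : Int)
        = (b.countP (fun x => v < x) : Int)) := by
  set bs := PySem.List.sorted b (fun x => x) false with hbs
  have hperm : bs.Perm b := PySem.List.sorted_perm b (fun x => x) false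
  have hs : bs.Pairwise (· ≤ ·) := PySem.List.sorted_pairwise b (fun x => x)
  have hbl : pvBlAux bs v bs.length 0 bs.length = bs.countP (fun x => x < v) :=
    pvBlAux_eq bs v hs bs.length 0 bs.length (by omega) (by omega) le_rfl (by omega) (by omega)
  have hbr : pvBrAux bs v bs.length 0 bs.length = bs.countP (fun x => x ≤ v) :=
    pvBrAux_eq bs v hs bs.length 0 bs.length (by omega) (by omega) le_rfl (by omega) (by omega)
  have h1 : bs.countP (fun x => x < v) = b.countP (fun x => x < v) := hperm.countP_eq _
  have h2 : bs.countP (fun x => x ≤ v) = b.countP (fun x => x ≤ v) := hperm.countP_eq _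
  have h3 : bs.countP (fun x => v == x) = b.countP (fun x => v == x) := hperm.countP_eq _
  have h5 : bs.countP (fun x => v < x) = b.countP (fun x => v < x) := hperm.countP_eq _
  have h4 : bs.length = b.length := hperm.length_eq
  have hsplit := pv_count_le_split v b
  have hlen := pv_count_len_split v b
  refine ⟨?_, ?_, ?_⟩ <;> omega

-- both folds over tuple_a add the same increment at every element
lemma pv_main (b : List Int) : ∀ (a : List Int) (c : Int × Int × Int),
    a.foldl (fun acc ai =>
      b.foldl (fun (c : Int × Int × Int) bx =>
        if ai > bx then (c.1 + 1, c.2.1, c.2.2)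
        else if ai == bx then (c.1, c.2.1 + 1, c.2.2)
        else (c.1, c.2.1, c.2.2 + 1)) acc) c
    = a.foldl (fun (c : Int × Int × Int) v =>
        (c.1 + (pvBlAux (PySem.List.sorted b (fun x => x) false) v (PySem.List.sorted b (fun x => x) false).length 0 (PySem.List.sorted b (fun x => x) false).length : Int),
         c.2.1 + ((pvBrAux (PySem.List.sorted b (fun x => x) false) v (PySem.List.sorted b (fun x => x) false).length 0 (PySem.List.sorted b (fun x => x) false).length : Int)
                  - (pvBlAux (PySem.List.sorted b (fun x => x) false) v (PySem.List.sorted b (fun x => x) false).length 0 (PySem.List.sorted b (fun x => x) false).length : Int)),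
         c.2.2 + (((PySem.List.sorted b (fun x => x) false).length : Int)
                  - (pvBrAux (PySem.List.sorted b (fun x => x) false) v (PySem.List.sorted b (fun x => x) false).length 0 (PySem.List.sorted b (fun x => x) false).length : Int)))) c := by
  intro a
  induction a with
  | nil => intro c; rfl
  | cons v t ih =>
    intro c
    simp only [List.foldl_cons]
    rw [pv_innerA v b c, ih]
    congr 1
    obtain ⟨e1, e2, e3⟩ := pv_stepB v b
    rw [e2, e3, e1]

-- ===== VERDICT (by name: the statement is the Claim_ definition above) =====
theorem tuple_comparison_2_spec : Claim_equal_tuple_comparison_2 := by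
  intro tuple_a tuple_b _
  unfold Spec_tuple_comparison_2 tuple_comparison_2 tuple_comparison_2_alt
  exact pv_main tuple_b tuple_a (0, 0, 0)
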